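-- pv_equiv track=rewrite | github.com/snallanc/Python-Projects | EPIProblems/count_num_of_1s_4.1.py | parity_improved
-- ===== SOURCE A (Python) =====
-- def parity_improved(x):
--     parity = 0
--     count = 0  # count is not required, just added for debugging purposes
--     while x:
--         count += 1
--         parity ^= 1
--         x &= (x-1)
--     return count, parity
-- ===== SOURCE B (Python) =====
-- def parity_improved(x):
--     count = bin(x).count('1')
--     return (count, count & 1)
-- ===== Notes on version B (the rewrite author's own statement) =====
-- stated objective: idiomatic
-- what changed: Replaces the Brian-Kernighan bit-clearing while-loop (with an XOR-toggled parity accumulator) by a single popcount of the binary string representation, deriving parity as count & 1 in closed form.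
import Mathlib
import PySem

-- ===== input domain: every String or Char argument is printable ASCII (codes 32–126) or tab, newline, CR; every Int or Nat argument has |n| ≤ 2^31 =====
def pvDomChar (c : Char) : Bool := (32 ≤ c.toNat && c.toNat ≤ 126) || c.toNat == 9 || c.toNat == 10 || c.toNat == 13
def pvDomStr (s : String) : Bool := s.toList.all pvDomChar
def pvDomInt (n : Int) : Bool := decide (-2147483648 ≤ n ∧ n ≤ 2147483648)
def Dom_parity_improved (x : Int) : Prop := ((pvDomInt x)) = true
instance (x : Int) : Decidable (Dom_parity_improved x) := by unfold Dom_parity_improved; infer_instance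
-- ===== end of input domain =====

-- B replaces A's Brian-Kernighan bit-clearing loop with a popcount and a closed-form parity (idiomatic).

-- ===== PORT A =====
-- termination lemma for the loop (cited by name in decreasing_by of kernLoop)
theorem pvBandPredToNatLt (x : Int) (h : 0 < x) :
    (PySem.Int.band x (x - 1)).toNat < x.toNat := by
  rw [PySem.Int.band_of_nonneg (by omega) (by omega : (0:Int) ≤ x - 1)]
  have hle : x.toNat &&& (x - 1).toNat ≤ (x - 1).toNat := Nat.and_le_right
  omega

-- Python's `while x:` never terminates for x < 0 (x &= x-1 stays negative); Pre_ excludes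
-- those inputs, and on 0 ≤ x the guard `0 < x` is exactly Python's `while x:`.
def kernLoop (x count parity : Int) : Int × Int :=
  if h : 0 < x then
    kernLoop (PySem.Int.band x (x - 1)) (count + 1) (PySem.Int.bxor parity 1)
  else (count, parity)
termination_by x.toNat
decreasing_by exact pvBandPredToNatLt x h

def parity_improved (x : Int) : Int × Int := kernLoop x 0 0

-- ===== PORT B =====
-- bin(x).count('1') is Python's popcount of |x|; ported as PySem.Int.bitCount (Python-exact).
def parity_improved_alt (x : Int) : Int × Int :=
  let count : Int := (PySem.Int.bitCount x : Int)
  (count, PySem.Int.band count 1)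

-- ===== PRECONDITION & SPEC =====
-- Pre_ excludes x < 0, on which A's while-loop never terminates (x &= x-1 keeps x negative).
def Pre_parity_improved (x : Int) : Prop := 0 ≤ x
instance (x : Int) : Decidable (Pre_parity_improved x) := by unfold Pre_parity_improved; infer_instance
def pvWitness_parity_improved : Int := 5

def Spec_parity_improved (x : Int) (out : Int × Int) : Prop := out = parity_improved_alt x
instance (x : Int) (out : Int × Int) : Decidable (Spec_parity_improved x out) := by unfold Spec_parity_improved; infer_instance

-- ===== CLAIM (what is proved, stated in full; the proofs are below) =====
def Claim_equal_parity_improved : Prop := ∀ (x : Int), Dom_parity_improved x → Pre_parity_improved x → Spec_parity_improved x (parity_improved x)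

-- ===== LEMMAS AND PROOFS =====

-- bitCount's halving step, valid at 0 as well
theorem pvBitCountStep (k : Nat) :
    PySem.Int.bitCount (k : Int) = k % 2 + PySem.Int.bitCount ((k / 2 : Nat) : Int) := by
  rcases Nat.eq_zero_or_pos k with hk | hk
  · subst hk; simp [PySem.Int.bitCount_zero]
  · exact PySem.Int.bitCount_natCast (m := k) hk

-- Kernighan: clearing the lowest set bit removes exactly one 1-bit
theorem pvKern (n : Nat) (h : 0 < n) :
    PySem.Int.bitCount ((n &&& (n - 1) : Nat) : Int) + 1 = PySem.Int.bitCount (n : Int) := by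
  induction n using Nat.strong_induction_on with
  | _ n ih =>
    have hdiv : (n &&& (n - 1)) / 2 = (n / 2) &&& ((n - 1) / 2) := Nat.and_div_two
    have hmod : (n &&& (n - 1)) % 2 = 0 := by
      have hiff := Nat.and_mod_two_eq_one (a := n) (b := n - 1)
      omega
    rw [pvBitCountStep (n &&& (n - 1)), pvBitCountStep n, hmod, hdiv]
    rcases Nat.mod_two_eq_zero_or_one n with he | ho
    · -- n even, recurse on n / 2
      have h2 : 0 < n / 2 := by omega
      have hpred : (n - 1) / 2 = n / 2 - 1 := by omega
      have := ih (n / 2) (by omega) h2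
      rw [hpred]
      omega
    · -- n odd: n &&& (n-1) halves to n / 2 itself
      have hpred : (n - 1) / 2 = n / 2 := by omega
      rw [hpred, Nat.and_self]
      omega

-- loop invariant: kernLoop on ↑n adds bitCount n to count and toggles parity bitCount n times
theorem pvKernLoop (n : Nat) (c p : Int) (hp : p = 0 ∨ p = 1) :
    kernLoop (n : Int) c p =
      (c + (PySem.Int.bitCount (n : Int) : Int),
       (((p.toNat + PySem.Int.bitCount (n : Int)) % 2 : Nat) : Int)) := by
  induction n using Nat.strong_induction_on generalizing c p with
  | _ n ih =>
    rcases Nat.eq_zero_or_pos n with hn | hn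
    · subst hn
      rw [kernLoop]
      simp only [Nat.cast_zero, PySem.Int.bitCount_zero]
      rcases hp with hp | hp <;> subst hp <;> norm_num
    · rw [kernLoop]
      have hpos : (0 : Int) < (n : Int) := by exact_mod_cast hn
      rw [dif_pos hpos]
      have hcast : (n : Int) - 1 = ((n - 1 : Nat) : Int) := by omega
      have hband : PySem.Int.band (n : Int) ((n : Int) - 1) = ((n &&& (n - 1) : Nat) : Int) := by
        rw [hcast]; simp
      have hm : n &&& (n - 1) < n := by
        have h : n &&& (n - 1) ≤ n - 1 := Nat.and_le_right; omega
      have hk := pvKern n hn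
      rcases hp with hp | hp <;> subst hp
      · have hx : PySem.Int.bxor (0 : Int) 1 = 1 := by decide
        rw [hband, hx, ih (n &&& (n - 1)) hm (c + 1) 1 (Or.inr rfl)]
        have h2 := Nat.mod_two_eq_zero_or_one (PySem.Int.bitCount ((n &&& (n - 1) : Nat) : Int))
        refine Prod.ext ?_ ?_ <;> simp only
        · omega
        · have : ((1 : Int)).toNat = 1 := rfl
          rw [this]
          have : ((0 : Int)).toNat = 0 := rfl
          rw [this]
          congr 1
          omega
      · have hx : PySem.Int.bxor (1 : Int) 1 = 0 := by decide
        rw [hband, hx, ih (n &&& (n - 1)) hm (c + 1) 0 (Or.inl rfl)]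
        refine Prod.ext ?_ ?_ <;> simp only
        · omega
        · have h1 : ((1 : Int)).toNat = 1 := rfl
          have h0 : ((0 : Int)).toNat = 0 := rfl
          rw [h1, h0]
          congr 1
          omega

-- ===== VERDICT (by name: the statement is the Claim_ definition above) =====
theorem parity_improved_spec : Claim_equal_parity_improved := by
  intro x _ hpre
  unfold Pre_parity_improved at hpre
  unfold Spec_parity_improved parity_improved parity_improved_alt
  have hx : x = ((x.toNat : Nat) : Int) := by omega
  rw [hx, pvKernLoop x.toNat 0 0 (Or.inl rfl)]
  have hb : PySem.Int.band ((PySem.Int.bitCount ((x.toNat : Nat) : Int) : Nat) : Int) 1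
      = (((PySem.Int.bitCount ((x.toNat : Nat) : Int) % 2 : Nat)) : Int) := by
    rw [PySem.Int.band_one]
    exact_mod_cast PySem.Int.mod_natCast (PySem.Int.bitCount ((x.toNat : Nat) : Int)) 2
  simp only [hb]
  refine Prod.ext ?_ ?_ <;> simp only
  · omega
  · norm_num
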